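-- pv_equiv track=rewrite | github.com/colemai/bioinformatics_scripts | rosalind/ros12_reverse_translation_options.py | calculate_modulo_reverse_translations
-- ===== SOURCE A (Python) =====
-- def aa_to_codons (aa):
-- 	"""
-- 	Input: an amino acid single-char symble
-- 	Output: the number of RNA codons that could have coded for that amino acid, int
-- 	NOTE: Stop codon represented by *
-- 	"""
-- 	#TODO make input uppercase
-- 	return {
-- 		'E': 2,
-- 		'V': 4,
-- 		'H': 2,
-- 		'D': 2,
-- 		'G': 4,
-- 		'S': 6,
-- 		'I': 3,
-- 		'L': 6,
-- 		'C': 2,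
-- 		'M': 1,
-- 		'N': 2,
-- 		'A': 4,
-- 		'Q': 2,
-- 		'Y': 2,
-- 		'P': 4,
-- 		'*': 3,
-- 		'T': 4,
-- 		'W': 1,
-- 		'K': 2,
-- 		'R': 6,
-- 		'F': 2
-- 	}.get(aa, '')
--
-- def calculate_modulo_reverse_translations (seq):
-- 	"""
-- 	Input: A single string protein sequence
-- 	Output: The int number of reverse translation possibilities of that sequence modulo 1,000,000
-- 	TODO: try again on the more compute friendly way to do this (commented out lines + move the if)
-- 	"""
-- 	possible_translations = 1
-- 	for aa in seq:
-- 		number_codons = aa_to_codons(aa)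
-- 		occurences_aa = seq.count(aa)
-- 		possible_translations *= number_codons
-- 		# possible_translations *= (number_codons^occurences_aa)
-- 		# seq = seq.replace(aa, '')
--
-- 	#multiply  * 3 due for the stop codon possibilities
-- 	possible_translations *= 3
-- 	possible_translations = possible_translations % 1000000
-- 	return possible_translations
-- ===== SOURCE B (Python) =====
-- AA_TO_CODONS = {
--     'E': 2, 'V': 4, 'H': 2, 'D': 2, 'G': 4, 'S': 6, 'I': 3, 'L': 6,
--     'C': 2, 'M': 1, 'N': 2, 'A': 4, 'Q': 2, 'Y': 2, 'P': 4, '*': 3,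
--     'T': 4, 'W': 1, 'K': 2, 'R': 6, 'F': 2,
-- }
--
--
-- def calculate_modulo_reverse_translations(seq):
--     # One pass builds a frequency table; then one multiplication per DISTINCT
--     # amino acid, using pow on the multiplicity.
--     counts = {}
--     for aa in seq:
--         counts[aa] = counts.get(aa, 0) + 1
--     possible_translations = 1
--     for aa, k in counts.items():
--         possible_translations *= AA_TO_CODONS[aa] ** k
--     return possible_translations * 3 % 1000000
-- ===== Notes on version B (the rewrite author's own statement) =====
-- stated objective: alternative
-- what changed: B replaces A's per-character multiplication loop (which also runs a useless seq.count scan each step) by one counting pass and a single pow-and-multiply per distinct amino acid.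
import Mathlib
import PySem

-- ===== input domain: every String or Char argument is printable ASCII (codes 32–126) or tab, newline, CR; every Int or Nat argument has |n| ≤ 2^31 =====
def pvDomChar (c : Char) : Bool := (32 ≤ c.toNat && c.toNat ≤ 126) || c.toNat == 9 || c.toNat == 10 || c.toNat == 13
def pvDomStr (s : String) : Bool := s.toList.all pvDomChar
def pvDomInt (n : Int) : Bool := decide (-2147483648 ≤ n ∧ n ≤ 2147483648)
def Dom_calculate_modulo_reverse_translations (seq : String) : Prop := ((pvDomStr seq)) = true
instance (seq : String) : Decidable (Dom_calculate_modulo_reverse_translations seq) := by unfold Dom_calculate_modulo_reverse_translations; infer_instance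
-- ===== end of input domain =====

-- B replaces A's per-character multiply (with a useless O(n) seq.count each step) by one counting
-- pass plus one pow per distinct amino acid; equal return values proved on sequences of known amino acids.

-- ===== PORT A =====
-- the dict literal inside aa_to_codons
def pvCodonTable : PySem.Dict Char Int := PySem.Dict.ofList
  [('E', 2), ('V', 4), ('H', 2), ('D', 2), ('G', 4), ('S', 6), ('I', 3), ('L', 6),
   ('C', 2), ('M', 1), ('N', 2), ('A', 4), ('Q', 2), ('Y', 2), ('P', 4), ('*', 3),
   ('T', 4), ('W', 1), ('K', 2), ('R', 6), ('F', 2)]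

-- aa_to_codons: .get(aa, '') — none models the '' default (Python then raises TypeError at
-- the final '%'; those inputs are outside Pre_)
def aa_to_codons (aa : Char) : Option Int := pvCodonTable.get? aa

def calculate_modulo_reverse_translations (seq : String) : Int :=
  let possible_translations : Int := seq.toList.foldl
    (fun possible_translations aa =>
      let number_codons := (aa_to_codons aa).getD 0     -- always `some` inside Pre_
      let _occurences_aa : Int := seq.toList.count aa   -- seq.count(aa): computed, unused
      possible_translations * number_codons) 1
  PySem.Int.mod (possible_translations * 3) 1000000

-- ===== PORT B =====
def calculate_modulo_reverse_translations_alt (seq : String) : Int :=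
  let counts : PySem.Dict Char Int := seq.toList.foldl
    (fun counts aa => counts.insert aa (counts.getD aa 0 + 1)) PySem.Dict.empty
  let possible_translations : Int := counts.items.foldl
    (fun possible_translations kv =>
      possible_translations * ((pvCodonTable.get? kv.1).getD 0) ^ kv.2.toNat) 1
  PySem.Int.mod (possible_translations * 3) 1000000

-- ===== PRECONDITION & SPEC =====
-- Pre_ excludes sequences containing a character outside the codon table: there aa_to_codons
-- returns '' and A raises TypeError ('' propagates to '%'), so A returns no int.
def Pre_calculate_modulo_reverse_translations (seq : String) : Prop :=
  (seq.toList.all (fun c =>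
    (['E', 'V', 'H', 'D', 'G', 'S', 'I', 'L', 'C', 'M', 'N',
      'A', 'Q', 'Y', 'P', '*', 'T', 'W', 'K', 'R', 'F'] : List Char).contains c)) = true
instance (seq : String) : Decidable (Pre_calculate_modulo_reverse_translations seq) := by
  unfold Pre_calculate_modulo_reverse_translations; infer_instance

def pvWitness_calculate_modulo_reverse_translations : String := "MA*"

def Spec_calculate_modulo_reverse_translations (seq : String) (out : Int) : Prop := out = calculate_modulo_reverse_translations_alt seq
instance (seq : String) (out : Int) : Decidable (Spec_calculate_modulo_reverse_translations seq out) := by unfold Spec_calculate_modulo_reverse_translations; infer_instance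

-- ===== CLAIM (what is proved, stated in full; the proofs are below) =====
def Claim_equal_calculate_modulo_reverse_translations : Prop := ∀ (seq : String), Dom_calculate_modulo_reverse_translations seq → Pre_calculate_modulo_reverse_translations seq → Spec_calculate_modulo_reverse_translations seq (calculate_modulo_reverse_translations seq)

-- ===== LEMMAS AND PROOFS =====

-- dedup preserves the underlying finite set of elements
theorem pv_toFinset_dedup (l : List Char) : (PySem.List.dedup l).toFinset = l.toFinset := by
  ext c; simp

-- the products agree: one factor per character vs one pow per distinct character
theorem pv_fold_eq (l : List Char) (f : Char → Int) :
    l.foldl (fun p a => p * f a) 1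
      = (PySem.List.dedup l).foldl (fun p a => p * f a ^ l.count a) 1 := by
  have h1 : l.foldl (fun p a => p * f a) 1 = (l.map f).prod := by
    rw [List.prod_eq_foldl, List.foldl_map]
  have h2 : (PySem.List.dedup l).foldl (fun p a => p * f a ^ l.count a) 1
      = ((PySem.List.dedup l).map (fun a => f a ^ l.count a)).prod := by
    rw [List.prod_eq_foldl, List.foldl_map]
  rw [h1, h2, Finset.prod_list_map_count l f, ← pv_toFinset_dedup]
  exact (List.prod_toFinset (fun a => f a ^ l.count a) (PySem.List.nodup_dedup l))

-- ===== VERDICT (by name: the statement is the Claim_ definition above) =====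
theorem calculate_modulo_reverse_translations_spec : Claim_equal_calculate_modulo_reverse_translations := by
  intro seq _ _
  unfold Spec_calculate_modulo_reverse_translations
  simp only [calculate_modulo_reverse_translations, calculate_modulo_reverse_translations_alt,
    aa_to_codons, PySem.Dict.foldl_insert_getD_add_one_eq_counter, PySem.Dict.items_counter,
    ← PySem.List.dedup_eq_ofList, List.foldl_map, Int.toNat_natCast]
  rw [pv_fold_eq seq.toList (fun a => (pvCodonTable.get? a).getD 0)]
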